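-- pv_equiv track=rewrite | github.com/DUNE/dune-justin | modules/__init__.py | fixPfn
-- ===== SOURCE A (Python) =====
-- def fixPfn(pfn):
--
--   for (old, new) in \
--      [('.cern.ch/eos/',          '.cern.ch//eos/'          ),
--       ('.in2p3.fr:1097/xrootd/', '.in2p3.fr:1097//xrootd/' ),
--       ('.bnl.gov:1094/pnfs/',    '.bnl.gov:1094//pnfs/'    ),
--       ('.bnl.gov:1096/pnfs/',    '.bnl.gov:1096//pnfs/'    ),
--       ('.lancs.ac.uk/dpm/',      '.lancs.ac.uk//dpm/'      ),
--       ('.liv.ac.uk/dune/',       '.liv.ac.uk//dune/'       ),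
--       ('.manchester.ac.uk/dune/','.manchester.ac.uk//dune/'),
--       ('.qmul.ac.uk:1094/dune/', 'qmul.ac.uk:1094//dune/'  )
--      ]:
--     pfn = pfn.replace(old, new)
--
--   return pfn
-- ===== SOURCE B (Python) =====
-- _RULES = [('.cern.ch/eos/',          '.cern.ch//eos/'          ),
--           ('.in2p3.fr:1097/xrootd/', '.in2p3.fr:1097//xrootd/' ),
--           ('.bnl.gov:1094/pnfs/',    '.bnl.gov:1094//pnfs/'    ),
--           ('.bnl.gov:1096/pnfs/',    '.bnl.gov:1096//pnfs/'    ),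
--           ('.lancs.ac.uk/dpm/',      '.lancs.ac.uk//dpm/'      ),
--           ('.liv.ac.uk/dune/',       '.liv.ac.uk//dune/'       ),
--           ('.manchester.ac.uk/dune/','.manchester.ac.uk//dune/'),
--           ('.qmul.ac.uk:1094/dune/', 'qmul.ac.uk:1094//dune/'  )]
--
-- def fixPfn(pfn):
--   # single left-to-right scan: at each position try the eight rules in order
--   out = []
--   i = 0
--   n = len(pfn)
--   while i < n:
--     for old, new in _RULES:
--       if pfn.startswith(old, i):
--         out.append(new)
--         i += len(old)
--         break
--     else:
--       out.append(pfn[i])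
--       i += 1
--   return ''.join(out)
-- ===== Notes on version B (the rewrite author's own statement) =====
-- stated objective: alternative
-- what changed: Replaces A's eight sequential whole-string str.replace passes by a single left-to-right scan that tries the eight (old, new) rules at each position, emitting the replacement and skipping len(old) on a match; this is equivalent because the rules are pairwise non-overlapping and no replacement text can create or complete a rule occurrence.
import Mathlib
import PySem

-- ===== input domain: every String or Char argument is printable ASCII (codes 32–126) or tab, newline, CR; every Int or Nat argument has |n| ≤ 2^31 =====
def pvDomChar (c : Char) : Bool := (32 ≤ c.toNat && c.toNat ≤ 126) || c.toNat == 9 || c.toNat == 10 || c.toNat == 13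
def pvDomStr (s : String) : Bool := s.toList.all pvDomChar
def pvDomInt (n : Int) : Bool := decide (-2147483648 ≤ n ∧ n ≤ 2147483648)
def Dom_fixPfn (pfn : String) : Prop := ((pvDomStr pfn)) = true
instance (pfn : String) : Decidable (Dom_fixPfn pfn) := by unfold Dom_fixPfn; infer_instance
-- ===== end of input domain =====

-- B replaces A's eight sequential whole-string replace passes by ONE left-to-right scan
-- that tries the eight rules at each position (objective: alternative single-pass algorithm).

-- ===== PORT A =====
-- the literal (old, new) list of A's for-loop
def fixPfnTable : List (String × String) :=
  [(".cern.ch/eos/",           ".cern.ch//eos/"          ),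
   (".in2p3.fr:1097/xrootd/",  ".in2p3.fr:1097//xrootd/" ),
   (".bnl.gov:1094/pnfs/",     ".bnl.gov:1094//pnfs/"    ),
   (".bnl.gov:1096/pnfs/",     ".bnl.gov:1096//pnfs/"    ),
   (".lancs.ac.uk/dpm/",       ".lancs.ac.uk//dpm/"      ),
   (".liv.ac.uk/dune/",        ".liv.ac.uk//dune/"       ),
   (".manchester.ac.uk/dune/", ".manchester.ac.uk//dune/"),
   (".qmul.ac.uk:1094/dune/",  "qmul.ac.uk:1094//dune/"  )]

-- for (old, new) in [...]: pfn = pfn.replace(old, new); return pfn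
def fixPfn (pfn : String) : String :=
  fixPfnTable.foldl (fun s pr => PySem.Str.replace s pr.1 pr.2) pfn

-- ===== PORT B =====
-- the same rule list, on code-point lists
def fixPfnRules : List (List Char × List Char) :=
  [(".cern.ch/eos/".toList,           ".cern.ch//eos/".toList          ),
   (".in2p3.fr:1097/xrootd/".toList,  ".in2p3.fr:1097//xrootd/".toList ),
   (".bnl.gov:1094/pnfs/".toList,     ".bnl.gov:1094//pnfs/".toList    ),
   (".bnl.gov:1096/pnfs/".toList,     ".bnl.gov:1096//pnfs/".toList    ),
   (".lancs.ac.uk/dpm/".toList,       ".lancs.ac.uk//dpm/".toList      ),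
   (".liv.ac.uk/dune/".toList,        ".liv.ac.uk//dune/".toList       ),
   (".manchester.ac.uk/dune/".toList, ".manchester.ac.uk//dune/".toList),
   (".qmul.ac.uk:1094/dune/".toList,  "qmul.ac.uk:1094//dune/".toList  )]

-- Source B's while-loop: at position i try the rules in order; emit the replacement and
-- advance by len(old) on a match, else emit the character.  fuel = remaining length.
def fixPfnScan (T : List (List Char × List Char)) : Nat → List Char → List Char
  | 0, s => s
  | _ + 1, [] => []
  | fuel + 1, c :: t =>
    match T.find? (fun pr => pr.1.isPrefixOf (c :: t)) with
    | some (p, n) => n ++ fixPfnScan T fuel ((c :: t).drop p.length)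
    | none => c :: fixPfnScan T fuel t

def fixPfn_alt (pfn : String) : String :=
  String.ofList (fixPfnScan fixPfnRules pfn.toList.length pfn.toList)

-- ===== PRECONDITION & SPEC =====
def Spec_fixPfn (pfn : String) (out : String) : Prop := out = fixPfn_alt pfn
instance (pfn : String) (out : String) : Decidable (Spec_fixPfn pfn out) := by unfold Spec_fixPfn; infer_instance

-- ===== CLAIM (what is proved, stated in full; the proofs are below) =====
def Claim_equal_fixPfn : Prop := ∀ (pfn : String), Dom_fixPfn pfn → Spec_fixPfn pfn (fixPfn pfn)

-- ===== LEMMAS AND PROOFS =====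

-- the scan with enough fuel, as used by fixPfn_alt
def scanT (T : List (List Char × List Char)) (s : List Char) : List Char :=
  fixPfnScan T s.length s

-- fuel irrelevance: any fuel ≥ |s| computes the same scan (patterns are nonempty)
lemma scan_fuel (T : List (List Char × List Char)) (h1 : ∀ pr ∈ T, pr.1 ≠ [])
    (fuel : Nat) : ∀ (fuel' : Nat) (s : List Char), s.length ≤ fuel → s.length ≤ fuel' →
    fixPfnScan T fuel s = fixPfnScan T fuel' s := by
  induction fuel with
  | zero =>
    intro fuel' s hs _
    have : s = [] := List.eq_nil_of_length_eq_zero (Nat.le_zero.mp hs)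
    subst this
    cases fuel' <;> rfl
  | succ fuel ih =>
    intro fuel' s hs hs'
    cases fuel' with
    | zero =>
      have : s = [] := List.eq_nil_of_length_eq_zero (Nat.le_zero.mp hs')
      subst this; rfl
    | succ fuel' =>
      cases s with
      | nil => rfl
      | cons c t =>
        simp only [fixPfnScan]
        cases hf : T.find? (fun pr => pr.1.isPrefixOf (c :: t)) with
        | none =>
          simp only []
          rw [ih fuel' t (by simpa using Nat.le_of_succ_le_succ hs)
            (by simpa using Nat.le_of_succ_le_succ hs')]
        | some pn =>
          obtain ⟨p, n⟩ := pn
          have hp1 : 1 ≤ p.length := by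
            have hmem := List.mem_of_find?_eq_some hf
            have := h1 _ hmem
            cases p with
            | nil => exact absurd rfl this
            | cons _ _ => simp
          have hlen : ((c :: t).drop p.length).length ≤ fuel := by
            simp only [List.length_drop]
            have : (c :: t).length ≤ fuel + 1 := hs
            simp only [List.length_cons] at this ⊢
            omega
          have hlen' : ((c :: t).drop p.length).length ≤ fuel' := by
            simp only [List.length_drop]
            have : (c :: t).length ≤ fuel' + 1 := hs'
            simp only [List.length_cons] at this ⊢
            omega
          show n ++ fixPfnScan T fuel ((c :: t).drop p.length)
            = n ++ fixPfnScan T fuel' ((c :: t).drop p.length)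
          rw [ih fuel' _ hlen hlen']

lemma scan_nil (T : List (List Char × List Char)) : scanT T [] = [] := rfl

lemma scan_match (T : List (List Char × List Char)) (h1 : ∀ pr ∈ T, pr.1 ≠ [])
    (s : List Char) (hs : s ≠ []) (p n : List Char)
    (hf : T.find? (fun pr => pr.1.isPrefixOf s) = some (p, n)) :
    scanT T s = n ++ scanT T (s.drop p.length) := by
  cases s with
  | nil => exact absurd rfl hs
  | cons c t =>
    have hp1 : 1 ≤ p.length := by
      have hmem := List.mem_of_find?_eq_some hf
      have := h1 _ hmem
      cases p with
      | nil => exact absurd rfl this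
      | cons _ _ => simp
    show fixPfnScan T (c :: t).length (c :: t) = _
    simp only [List.length_cons, fixPfnScan, hf]
    congr 1
    exact scan_fuel T h1 t.length _ ((c :: t).drop p.length)
      (by simp only [List.length_drop, List.length_cons]; omega) (le_refl _)

lemma scan_nomatch (T : List (List Char × List Char)) (c : Char) (t : List Char)
    (hf : T.find? (fun pr => pr.1.isPrefixOf (c :: t)) = none) :
    scanT T (c :: t) = c :: scanT T t := by
  show fixPfnScan T (c :: t).length (c :: t) = _
  simp only [List.length_cons, fixPfnScan, hf]
  rfl

-- SPLIT: if no pattern of T is prefix-comparable with any nonempty suffix of u,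
-- the scan copies u and continues on v
lemma scan_split (T : List (List Char × List Char)) (h1 : ∀ pr ∈ T, pr.1 ≠ [])
    (u : List Char)
    (hu : ∀ pr ∈ T, ∀ k, k < u.length → ¬(u.drop k <+: pr.1) ∧ ¬(pr.1 <+: u.drop k)) :
    ∀ v, scanT T (u ++ v) = u ++ scanT T v := by
  induction u with
  | nil => intro v; simp
  | cons a u' ih =>
    intro v
    have hf : T.find? (fun pr => pr.1.isPrefixOf (a :: u' ++ v)) = none := by
      rw [List.find?_eq_none]
      intro pr hpr
      simp only [List.isPrefixOf_iff_prefix]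
      intro hpre
      rcases List.prefix_or_prefix_of_prefix hpre (List.prefix_append (a :: u') v) with h | h
      · exact (hu pr hpr 0 (by simp)).2 (by simpa using h)
      · exact (hu pr hpr 0 (by simp)).1 (by simpa using h)
    rw [show (a :: u') ++ v = a :: (u' ++ v) by simp, scan_nomatch T a (u' ++ v) hf]
    rw [ih (fun pr hpr k hk => by
      have := hu pr hpr (k + 1) (by simpa using Nat.succ_lt_succ hk)
      simpa using this) v]
    simp

-- NO-CREATE: a nonempty proper suffix of the new pattern p that is a prefix of the scan
-- output was already a prefix of the input (suffixes of p are incomparable with every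
-- replacement of T, so a match of p cannot lean into replaced text)
lemma scan_nocreate (T : List (List Char × List Char)) (p : List Char)
    (h1 : ∀ pr ∈ T, pr.1 ≠ [])
    (hC : ∀ pr ∈ T, ∀ k, k < p.length → 0 < k → ¬(p.drop k <+: pr.2) ∧ ¬(pr.2 <+: p.drop k)) :
    ∀ (N : Nat) (t : List Char), t.length ≤ N → ∀ k, 0 < k →
      p.drop k <+: scanT T t → p.drop k <+: t := by
  intro N
  induction N with
  | zero =>
    intro t ht k hk hpre
    have : t = [] := List.eq_nil_of_length_eq_zero (Nat.le_zero.mp ht)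
    subst this
    rw [scan_nil] at hpre
    rw [List.prefix_nil.mp hpre]
  | succ N ih =>
    intro t ht k hk hpre
    by_cases hkp : k < p.length
    · cases t with
      | nil =>
        rw [scan_nil] at hpre
        rw [List.prefix_nil.mp hpre]
      | cons c t' =>
        cases hf : T.find? (fun pr => pr.1.isPrefixOf (c :: t')) with
        | none =>
          rw [scan_nomatch T c t' hf] at hpre
          rw [List.drop_eq_getElem_cons hkp] at hpre ⊢
          rw [List.cons_prefix_cons] at hpre ⊢
          refine ⟨hpre.1, ?_⟩
          exact ih t' (by simpa using Nat.le_of_succ_le_succ ht) (k + 1) (Nat.succ_pos k) hpre.2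
        | some pn =>
          obtain ⟨pj, nj⟩ := pn
          have hmem := List.mem_of_find?_eq_some hf
          exfalso
          rw [scan_match T h1 (c :: t') (by simp) pj nj hf] at hpre
          rcases List.prefix_or_prefix_of_prefix hpre (List.prefix_append nj _) with h | h
          · exact (hC _ hmem k hkp hk).1 h
          · exact (hC _ hmem k hkp hk).2 h
    · -- k ≥ p.length : p.drop k = []
      rw [List.drop_eq_nil_of_le (Nat.le_of_not_lt hkp)]
      exact List.nil_prefix

-- COMPOSE: a single-rule scan after a T-scan equals the scan with the rule appended
lemma scan_comp (T : List (List Char × List Char)) (p n : List Char)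
    (hT1 : ∀ pr ∈ T, pr.1 ≠ []) (hp0 : p ≠ [])
    (hA : ∀ pr ∈ T, ∀ k, k < pr.2.length → ¬(pr.2.drop k <+: p) ∧ ¬(p <+: pr.2.drop k))
    (hB0 : ∀ pr ∈ T, p ≠ pr.1 → ¬(p <+: pr.1) ∧ ¬(pr.1 <+: p))
    (hB : ∀ pr ∈ T, ∀ k, k < p.length → 0 < k → ¬(p.drop k <+: pr.1) ∧ ¬(pr.1 <+: p.drop k))
    (hC : ∀ pr ∈ T, ∀ k, k < p.length → 0 < k → ¬(p.drop k <+: pr.2) ∧ ¬(pr.2 <+: p.drop k)) :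
    ∀ (N : Nat) (s : List Char), s.length ≤ N →
      scanT [(p, n)] (scanT T s) = scanT (T ++ [(p, n)]) s := by
  have hT1' : ∀ pr ∈ T ++ [(p, n)], pr.1 ≠ [] := by
    intro pr hpr
    rcases List.mem_append.mp hpr with h | h
    · exact hT1 pr h
    · simp at h; subst h; exact hp0
  have hs1 : ∀ pr ∈ [(p, n)], pr.1 ≠ [] := by
    intro pr hpr; simp at hpr; subst hpr; exact hp0
  intro N
  induction N with
  | zero =>
    intro s hs
    have : s = [] := List.eq_nil_of_length_eq_zero (Nat.le_zero.mp hs)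
    subst this
    simp [scan_nil]
  | succ N ih =>
    intro s hs
    cases s with
    | nil => simp [scan_nil]
    | cons c t =>
      cases hf : T.find? (fun pr => pr.1.isPrefixOf (c :: t)) with
      | some pn' =>
        obtain ⟨pj, nj⟩ := pn'
        have hmem := List.mem_of_find?_eq_some hf
        have hpj1 : 1 ≤ pj.length := by
          have := hT1 _ hmem
          cases pj with
          | nil => exact absurd rfl this
          | cons _ _ => simp
        have hfa : (T ++ [(p, n)]).find? (fun pr => pr.1.isPrefixOf (c :: t)) = some (pj, nj) := by
          rw [List.find?_append, hf]; rfl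
        rw [scan_match T hT1 (c :: t) (by simp) pj nj hf,
            scan_match (T ++ [(p, n)]) hT1' (c :: t) (by simp) pj nj hfa]
        rw [scan_split [(p, n)] hs1 nj (by
          intro pr hpr k hk
          simp at hpr; subst hpr
          exact hA _ hmem k hk)]
        congr 1
        exact ih ((c :: t).drop pj.length)
          (by simp only [List.length_drop]; simp only [List.length_cons] at hs ⊢; omega)
      | none =>
        by_cases hp : p <+: (c :: t)
        · -- the new rule fires
          obtain ⟨rest, hrest⟩ := hp
          have hsp : scanT T (c :: t) = p ++ scanT T rest := by
            rw [← hrest]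
            apply scan_split T hT1 p
            intro pr hpr k hk
            rcases Nat.eq_zero_or_pos k with h0 | h0
            · subst h0
              have hppj : p ≠ pr.1 := by
                intro he
                have hnp : ¬ pr.1.isPrefixOf (c :: t) = true := by
                  have := List.find?_eq_none.mp hf pr hpr
                  simpa using this
                exact hnp (by
                  rw [List.isPrefixOf_iff_prefix, ← he, ← hrest]
                  exact List.prefix_append p rest)
              simpa using hB0 pr hpr hppj
            · exact hB pr hpr k hk h0
          rw [hsp]
          have hfs : ([(p, n)]).find? (fun pr => pr.1.isPrefixOf (p ++ scanT T rest)) = some (p, n) := by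
            have hb : p.isPrefixOf (p ++ scanT T rest) = true :=
              List.isPrefixOf_iff_prefix.mpr (List.prefix_append p _)
            simp [List.find?, hb]
          have hps : p ++ scanT T rest ≠ [] := by
            cases p with
            | nil => exact absurd rfl hp0
            | cons _ _ => simp
          rw [scan_match [(p, n)] hs1 (p ++ scanT T rest) hps p n hfs]
          rw [List.drop_left]
          have hfa : (T ++ [(p, n)]).find? (fun pr => pr.1.isPrefixOf (c :: t)) = some (p, n) := by
            rw [List.find?_append, hf]
            have hb : p.isPrefixOf (c :: t) = true := by
              rw [List.isPrefixOf_iff_prefix, ← hrest]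
              exact List.prefix_append p rest
            simp [List.find?, hb]
          rw [scan_match (T ++ [(p, n)]) hT1' (c :: t) (by simp) p n hfa]
          rw [← hrest, List.drop_left]
          congr 1
          apply ih rest
          have hl : (c :: t).length = p.length + rest.length := by rw [← hrest]; simp
          have hple : 1 ≤ p.length := by
            cases p with
            | nil => exact absurd rfl hp0
            | cons _ _ => simp
          simp only [List.length_cons] at hl hs
          omega
        · -- no rule fires at this position
          have hfa : (T ++ [(p, n)]).find? (fun pr => pr.1.isPrefixOf (c :: t)) = none := by
            rw [List.find?_append, hf]
            have hb : p.isPrefixOf (c :: t) = false := by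
              rw [← Bool.not_eq_true, List.isPrefixOf_iff_prefix]
              exact hp
            simp [List.find?, hb]
          rw [scan_nomatch T c t hf, scan_nomatch (T ++ [(p, n)]) c t hfa]
          have hfs : ([(p, n)]).find? (fun pr => pr.1.isPrefixOf (c :: scanT T t)) = none := by
            simp only [List.find?]
            cases hb : p.isPrefixOf (c :: scanT T t) with
            | false => rfl
            | true =>
              exfalso
              have hpre : p <+: c :: scanT T t := List.isPrefixOf_iff_prefix.mp hb
              cases p with
              | nil => exact absurd rfl hp0
              | cons ph pt =>
                rw [List.cons_prefix_cons] at hpre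
                have h2 : (ph :: pt).drop 1 <+: t :=
                  scan_nocreate T (ph :: pt) hT1 hC t.length t (le_refl _) 1 (by simp)
                    (by simpa using hpre.2)
                apply hp
                rw [List.cons_prefix_cons]
                exact ⟨hpre.1, by simpa using h2⟩
          rw [scan_nomatch [(p, n)] c (scanT T t) hfs]
          congr 1
          exact ih t (by simpa using Nat.le_of_succ_le_succ hs)

-- Python's str.replace with one pattern IS the single-rule scan
lemma replace_eq_scan_single (old new : List Char) (hold : old ≠ []) :
    ∀ s, PySem.Chars.replace s old new = scanT [(old, new)] s := by
  have hs1 : ∀ pr ∈ [(old, new)], pr.1 ≠ [] := by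
    intro pr hpr; simp at hpr; subst hpr; exact hold
  have go_eq : ∀ (fuel : Nat) (s acc : List Char), s.length ≤ fuel →
      PySem.Chars.replace.go old new fuel s acc = acc.reverse ++ scanT [(old, new)] s := by
    intro fuel
    induction fuel with
    | zero =>
      intro s acc hs
      have : s = [] := List.eq_nil_of_length_eq_zero (Nat.le_zero.mp hs)
      subst this
      simp [PySem.Chars.replace.go, scan_nil]
    | succ fuel ih =>
      intro s acc hs
      cases s with
      | nil => simp [PySem.Chars.replace.go, scan_nil]
      | cons c t =>
        rw [PySem.Chars.replace.go]
        cases hb : old.isPrefixOf (c :: t) with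
        | true =>
          simp only [if_true]
          rw [ih ((c :: t).drop old.length) (new.reverse ++ acc)
              (by
                have hold1 : 1 ≤ old.length := by
                  cases old with
                  | nil => exact absurd rfl hold
                  | cons _ _ => simp
                simp only [List.length_drop]
                simp only [List.length_cons] at hs ⊢
                omega)]
          rw [scan_match [(old, new)] hs1 (c :: t) (by simp) old new
              (by simp [List.find?, hb])]
          simp
        | false =>
          rw [if_neg (by simp)]
          rw [ih t (c :: acc) (by simpa using Nat.le_of_succ_le_succ hs)]
          rw [scan_nomatch [(old, new)] c t (by simp [List.find?, hb])]
          simp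
  intro s
  have he : old.isEmpty = false := by
    cases old with
    | nil => exact absurd rfl hold
    | cons _ _ => rfl
  rw [PySem.Chars.replace, he]
  simpa using go_eq s.length s [] (le_refl _)

-- ===== VERDICT (by name: the statement is the Claim_ definition above) =====
theorem fixPfn_spec : Claim_equal_fixPfn := by
  intro pfn _
  show fixPfn pfn = fixPfn_alt pfn
  apply String.toList_inj.mp
  simp only [fixPfn, fixPfnTable, List.foldl_cons, List.foldl_nil, PySem.Str.toList_replace,
    fixPfn_alt, String.toList_ofList]
  rw [replace_eq_scan_single ".cern.ch/eos/".toList ".cern.ch//eos/".toList (by decide)]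
  rw [replace_eq_scan_single ".in2p3.fr:1097/xrootd/".toList ".in2p3.fr:1097//xrootd/".toList (by decide)]
  rw [replace_eq_scan_single ".bnl.gov:1094/pnfs/".toList ".bnl.gov:1094//pnfs/".toList (by decide)]
  rw [replace_eq_scan_single ".bnl.gov:1096/pnfs/".toList ".bnl.gov:1096//pnfs/".toList (by decide)]
  rw [replace_eq_scan_single ".lancs.ac.uk/dpm/".toList ".lancs.ac.uk//dpm/".toList (by decide)]
  rw [replace_eq_scan_single ".liv.ac.uk/dune/".toList ".liv.ac.uk//dune/".toList (by decide)]
  rw [replace_eq_scan_single ".manchester.ac.uk/dune/".toList ".manchester.ac.uk//dune/".toList (by decide)]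
  rw [replace_eq_scan_single ".qmul.ac.uk:1094/dune/".toList "qmul.ac.uk:1094//dune/".toList (by decide)]
  rw [show scanT [(".in2p3.fr:1097/xrootd/".toList, ".in2p3.fr:1097//xrootd/".toList)] (scanT [(".cern.ch/eos/".toList, ".cern.ch//eos/".toList)] pfn.toList) = scanT [(".cern.ch/eos/".toList, ".cern.ch//eos/".toList), (".in2p3.fr:1097/xrootd/".toList, ".in2p3.fr:1097//xrootd/".toList)] pfn.toList from by
    have := scan_comp [(".cern.ch/eos/".toList, ".cern.ch//eos/".toList)] ".in2p3.fr:1097/xrootd/".toList ".in2p3.fr:1097//xrootd/".toList (by decide) (by decide) (by decide)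
      (by decide) (by decide) (by decide) pfn.toList.length pfn.toList (le_refl _)
    simpa using this]
  rw [show scanT [(".bnl.gov:1094/pnfs/".toList, ".bnl.gov:1094//pnfs/".toList)] (scanT [(".cern.ch/eos/".toList, ".cern.ch//eos/".toList), (".in2p3.fr:1097/xrootd/".toList, ".in2p3.fr:1097//xrootd/".toList)] pfn.toList) = scanT [(".cern.ch/eos/".toList, ".cern.ch//eos/".toList), (".in2p3.fr:1097/xrootd/".toList, ".in2p3.fr:1097//xrootd/".toList), (".bnl.gov:1094/pnfs/".toList, ".bnl.gov:1094//pnfs/".toList)] pfn.toList from by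
    have := scan_comp [(".cern.ch/eos/".toList, ".cern.ch//eos/".toList), (".in2p3.fr:1097/xrootd/".toList, ".in2p3.fr:1097//xrootd/".toList)] ".bnl.gov:1094/pnfs/".toList ".bnl.gov:1094//pnfs/".toList (by decide) (by decide) (by decide)
      (by decide) (by decide) (by decide) pfn.toList.length pfn.toList (le_refl _)
    simpa using this]
  rw [show scanT [(".bnl.gov:1096/pnfs/".toList, ".bnl.gov:1096//pnfs/".toList)] (scanT [(".cern.ch/eos/".toList, ".cern.ch//eos/".toList), (".in2p3.fr:1097/xrootd/".toList, ".in2p3.fr:1097//xrootd/".toList), (".bnl.gov:1094/pnfs/".toList, ".bnl.gov:1094//pnfs/".toList)] pfn.toList) = scanT [(".cern.ch/eos/".toList, ".cern.ch//eos/".toList), (".in2p3.fr:1097/xrootd/".toList, ".in2p3.fr:1097//xrootd/".toList), (".bnl.gov:1094/pnfs/".toList, ".bnl.gov:1094//pnfs/".toList), (".bnl.gov:1096/pnfs/".toList, ".bnl.gov:1096//pnfs/".toList)] pfn.toList from by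
    have := scan_comp [(".cern.ch/eos/".toList, ".cern.ch//eos/".toList), (".in2p3.fr:1097/xrootd/".toList, ".in2p3.fr:1097//xrootd/".toList), (".bnl.gov:1094/pnfs/".toList, ".bnl.gov:1094//pnfs/".toList)] ".bnl.gov:1096/pnfs/".toList ".bnl.gov:1096//pnfs/".toList (by decide) (by decide) (by decide)
      (by decide) (by decide) (by decide) pfn.toList.length pfn.toList (le_refl _)
    simpa using this]
  rw [show scanT [(".lancs.ac.uk/dpm/".toList, ".lancs.ac.uk//dpm/".toList)] (scanT [(".cern.ch/eos/".toList, ".cern.ch//eos/".toList), (".in2p3.fr:1097/xrootd/".toList, ".in2p3.fr:1097//xrootd/".toList), (".bnl.gov:1094/pnfs/".toList, ".bnl.gov:1094//pnfs/".toList), (".bnl.gov:1096/pnfs/".toList, ".bnl.gov:1096//pnfs/".toList)] pfn.toList) = scanT [(".cern.ch/eos/".toList, ".cern.ch//eos/".toList), (".in2p3.fr:1097/xrootd/".toList, ".in2p3.fr:1097//xrootd/".toList), (".bnl.gov:1094/pnfs/".toList, ".bnl.gov:1094//pnfs/".toList), (".bnl.gov:1096/pnfs/".toList, ".bnl.gov:1096//pnfs/".toList),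 (".lancs.ac.uk/dpm/".toList, ".lancs.ac.uk//dpm/".toList)] pfn.toList from by
    have := scan_comp [(".cern.ch/eos/".toList, ".cern.ch//eos/".toList), (".in2p3.fr:1097/xrootd/".toList, ".in2p3.fr:1097//xrootd/".toList), (".bnl.gov:1094/pnfs/".toList, ".bnl.gov:1094//pnfs/".toList), (".bnl.gov:1096/pnfs/".toList, ".bnl.gov:1096//pnfs/".toList)] ".lancs.ac.uk/dpm/".toList ".lancs.ac.uk//dpm/".toList (by decide) (by decide) (by decide)
      (by decide) (by decide) (by decide) pfn.toList.length pfn.toList (le_refl _)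
    simpa using this]
  rw [show scanT [(".liv.ac.uk/dune/".toList, ".liv.ac.uk//dune/".toList)] (scanT [(".cern.ch/eos/".toList, ".cern.ch//eos/".toList), (".in2p3.fr:1097/xrootd/".toList, ".in2p3.fr:1097//xrootd/".toList), (".bnl.gov:1094/pnfs/".toList, ".bnl.gov:1094//pnfs/".toList), (".bnl.gov:1096/pnfs/".toList, ".bnl.gov:1096//pnfs/".toList), (".lancs.ac.uk/dpm/".toList, ".lancs.ac.uk//dpm/".toList)] pfn.toList) = scanT [(".cern.ch/eos/".toList, ".cern.ch//eos/".toList), (".in2p3.fr:1097/xrootd/".toList, ".in2p3.fr:1097//xrootd/".toList), (".bnl.gov:1094/pnfs/".toList, ".bnl.gov:1094//pnfs/".toList), (".bnl.gov:1096/pnfs/".toList, ".bnl.gov:1096//pnfs/".toList), (".lancs.ac.uk/dpm/".toList, ".lancs.ac.uk//dpm/".toList), (".liv.ac.uk/dune/".toList, ".liv.ac.uk//dune/".toList)] pfn.toList from by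
    have := scan_comp [(".cern.ch/eos/".toList, ".cern.ch//eos/".toList), (".in2p3.fr:1097/xrootd/".toList, ".in2p3.fr:1097//xrootd/".toList), (".bnl.gov:1094/pnfs/".toList, ".bnl.gov:1094//pnfs/".toList), (".bnl.gov:1096/pnfs/".toList, ".bnl.gov:1096//pnfs/".toList), (".lancs.ac.uk/dpm/".toList, ".lancs.ac.uk//dpm/".toList)] ".liv.ac.uk/dune/".toList ".liv.ac.uk//dune/".toList (by decide) (by decide) (by decide)
      (by decide) (by decide) (by decide) pfn.toList.length pfn.toList (le_refl _)
    simpa using this]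
  rw [show scanT [(".manchester.ac.uk/dune/".toList, ".manchester.ac.uk//dune/".toList)] (scanT [(".cern.ch/eos/".toList, ".cern.ch//eos/".toList), (".in2p3.fr:1097/xrootd/".toList, ".in2p3.fr:1097//xrootd/".toList), (".bnl.gov:1094/pnfs/".toList, ".bnl.gov:1094//pnfs/".toList), (".bnl.gov:1096/pnfs/".toList, ".bnl.gov:1096//pnfs/".toList), (".lancs.ac.uk/dpm/".toList, ".lancs.ac.uk//dpm/".toList), (".liv.ac.uk/dune/".toList, ".liv.ac.uk//dune/".toList)] pfn.toList) = scanT [(".cern.ch/eos/".toList, ".cern.ch//eos/".toList), (".in2p3.fr:1097/xrootd/".toList, ".in2p3.fr:1097//xrootd/".toList), (".bnl.gov:1094/pnfs/".toList, ".bnl.gov:1094//pnfs/".toList), (".bnl.gov:1096/pnfs/".toList, ".bnl.gov:1096//pnfs/".toList), (".lancs.ac.uk/dpm/".toList, ".lancs.ac.uk//dpm/".toList), (".liv.ac.uk/dune/".toList, ".liv.ac.uk//dune/".toList), (".manchester.ac.uk/dune/".toList, ".manchester.ac.uk//dune/".toList)] pfn.toList from by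
    have := scan_comp [(".cern.ch/eos/".toList, ".cern.ch//eos/".toList), (".in2p3.fr:1097/xrootd/".toList, ".in2p3.fr:1097//xrootd/".toList), (".bnl.gov:1094/pnfs/".toList, ".bnl.gov:1094//pnfs/".toList), (".bnl.gov:1096/pnfs/".toList, ".bnl.gov:1096//pnfs/".toList), (".lancs.ac.uk/dpm/".toList, ".lancs.ac.uk//dpm/".toList), (".liv.ac.uk/dune/".toList, ".liv.ac.uk//dune/".toList)] ".manchester.ac.uk/dune/".toList ".manchester.ac.uk//dune/".toList (by decide) (by decide) (by decide)
      (by decide) (by decide) (by decide) pfn.toList.length pfn.toList (le_refl _)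
    simpa using this]
  rw [show scanT [(".qmul.ac.uk:1094/dune/".toList, "qmul.ac.uk:1094//dune/".toList)] (scanT [(".cern.ch/eos/".toList, ".cern.ch//eos/".toList), (".in2p3.fr:1097/xrootd/".toList, ".in2p3.fr:1097//xrootd/".toList), (".bnl.gov:1094/pnfs/".toList, ".bnl.gov:1094//pnfs/".toList), (".bnl.gov:1096/pnfs/".toList, ".bnl.gov:1096//pnfs/".toList), (".lancs.ac.uk/dpm/".toList, ".lancs.ac.uk//dpm/".toList), (".liv.ac.uk/dune/".toList, ".liv.ac.uk//dune/".toList), (".manchester.ac.uk/dune/".toList, ".manchester.ac.uk//dune/".toList)] pfn.toList) = scanT [(".cern.ch/eos/".toList, ".cern.ch//eos/".toList), (".in2p3.fr:1097/xrootd/".toList, ".in2p3.fr:1097//xrootd/".toList), (".bnl.gov:1094/pnfs/".toList, ".bnl.gov:1094//pnfs/".toList), (".bnl.gov:1096/pnfs/".toList, ".bnl.gov:1096//pnfs/".toList), (".lancs.ac.uk/dpm/".toList, ".lancs.ac.uk//dpm/".toList), (".liv.ac.uk/dune/".toList, ".liv.ac.uk//dune/".toList), (".manchester.ac.uk/dune/".toList,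 ".manchester.ac.uk//dune/".toList), (".qmul.ac.uk:1094/dune/".toList, "qmul.ac.uk:1094//dune/".toList)] pfn.toList from by
    have := scan_comp [(".cern.ch/eos/".toList, ".cern.ch//eos/".toList), (".in2p3.fr:1097/xrootd/".toList, ".in2p3.fr:1097//xrootd/".toList), (".bnl.gov:1094/pnfs/".toList, ".bnl.gov:1094//pnfs/".toList), (".bnl.gov:1096/pnfs/".toList, ".bnl.gov:1096//pnfs/".toList), (".lancs.ac.uk/dpm/".toList, ".lancs.ac.uk//dpm/".toList), (".liv.ac.uk/dune/".toList, ".liv.ac.uk//dune/".toList), (".manchester.ac.uk/dune/".toList, ".manchester.ac.uk//dune/".toList)] ".qmul.ac.uk:1094/dune/".toList "qmul.ac.uk:1094//dune/".toList (by decide) (by decide) (by decide)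
      (by decide) (by decide) (by decide) pfn.toList.length pfn.toList (le_refl _)
    simpa using this]
  rfl
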